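-- pv_equiv track=rewrite | github.com/KumarAbhinav2/CodingProblems | Arrays/luckyNumber(LT-1394).py | pythonic
-- ===== SOURCE A (Python) =====
-- def pythonic(arr):
--     import collections
--     counter = collections.Counter(arr)
--     ans = -1
--     for k, v in counter.items():
--         if k == v:
--             ans = max(ans, k)
--     return ans
-- ===== SOURCE B (Python) =====
-- def pythonic(arr):
--     ans = -1
--     run_val = None
--     run_len = 0
--     for x in sorted(arr):
--         if x == run_val:
--             run_len += 1
--         else:
--             if run_val is not None and run_len == run_val:
--                 ans = max(ans, run_val)
--             run_val, run_len = x, 1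
--     if run_val is not None and run_len == run_val:
--         ans = max(ans, run_val)
--     return ans
-- ===== Notes on version B (the rewrite author's own statement) =====
-- stated objective: alternative
-- what changed: Replaced the Counter-plus-items scan with a sort of a copy of the list followed by a single run-length walk that closes each run and keeps the best value whose run length equals it.
import Mathlib
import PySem

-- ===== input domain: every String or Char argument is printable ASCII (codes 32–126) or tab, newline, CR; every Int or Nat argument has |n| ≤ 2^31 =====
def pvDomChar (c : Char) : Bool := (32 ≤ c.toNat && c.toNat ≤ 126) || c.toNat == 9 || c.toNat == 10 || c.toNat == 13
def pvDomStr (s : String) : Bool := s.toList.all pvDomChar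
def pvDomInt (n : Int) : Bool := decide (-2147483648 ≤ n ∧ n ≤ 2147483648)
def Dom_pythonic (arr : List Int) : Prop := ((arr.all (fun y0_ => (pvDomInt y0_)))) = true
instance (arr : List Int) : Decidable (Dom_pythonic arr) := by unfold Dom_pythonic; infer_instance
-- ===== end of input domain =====

-- B replaces A's Counter + items scan by sorting a copy of the list and walking it once,
-- tracking the current run; an alternative algorithm of comparable cost (no speed claim).

-- ===== PORT A =====
-- counter = collections.Counter(arr); for k, v in counter.items(): if k == v: ans = max(ans, k)
def pythonic (arr : List Int) : Int :=
  (PySem.Dict.counter arr).items.foldl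
    (fun ans kv => if kv.1 == kv.2 then max ans kv.1 else ans) (-1)

-- ===== PORT B =====
-- loop body: if x == run_val: run_len += 1 else: close the run, start a new one at x
def pythonicAltStep (s : Int × Option Int × Int) (x : Int) : Int × Option Int × Int :=
  if some x == s.2.1 then (s.1, s.2.1, s.2.2 + 1)
  else
    (match s.2.1 with
     | some v => if s.2.2 == v then max s.1 v else s.1
     | none => s.1, some x, 1)

-- final 'if run_val is not None and run_len == run_val: ans = max(ans, run_val)'
def pythonicAltClose (s : Int × Option Int × Int) : Int :=
  match s.2.1 with
  | some v => if s.2.2 == v then max s.1 v else s.1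
  | none => s.1

def pythonic_alt (arr : List Int) : Int :=
  pythonicAltClose ((PySem.List.sorted arr (fun x => x) false).foldl pythonicAltStep (-1, none, 0))

-- ===== PRECONDITION & SPEC =====
def Spec_pythonic (arr : List Int) (out : Int) : Prop := out = pythonic_alt arr
instance (arr : List Int) (out : Int) : Decidable (Spec_pythonic arr out) := by unfold Spec_pythonic; infer_instance

-- ===== CLAIM (what is proved, stated in full; the proofs are below) =====
def Claim_equal_pythonic : Prop := ∀ (arr : List Int), Dom_pythonic arr → Spec_pythonic arr (pythonic arr)

-- ===== LEMMAS AND PROOFS =====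

-- the step function for the canonical fold "ans = max(ans, k) whenever cnt k = k"
def pvF (cnt : Int → Int) (a k : Int) : Int := if cnt k = k then max a k else a

-- distinct values of a sorted list, in order (proof-only helper)
def pvGroups : List Int → List Int
  | [] => []
  | x :: t => x :: pvGroups (t.filter (fun y => y ≠ x))
termination_by l => l.length
decreasing_by
  simp only [List.length_cons, List.length_unattach]
  exact Nat.lt_succ_of_le (le_trans (List.length_filter_le _ _) (by simp))

lemma pvGroups_nil : pvGroups [] = [] := pvGroups.eq_1

lemma pvGroups_cons (x : Int) (t : List Int) :
    pvGroups (x :: t) = x :: pvGroups (t.filter (fun y => y ≠ x)) := by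
  rw [pvGroups.eq_def]

lemma pvGroups_mem_aux (n : Nat) : ∀ (l : List Int), l.length ≤ n →
    ∀ k, (k ∈ pvGroups l ↔ k ∈ l) := by
  induction n with
  | zero =>
    intro l hl k
    rw [List.length_eq_zero_iff.mp (Nat.le_zero.mp hl)]
    simp [pvGroups_nil]
  | succ n ih =>
    intro l hl k
    cases l with
    | nil => simp [pvGroups_nil]
    | cons x t =>
      rw [pvGroups_cons]
      by_cases hk : k = x
      · simp [hk]
      · have hlen : (t.filter (fun y => y ≠ x)).length ≤ n :=
          le_trans (List.length_filter_le _ _) (by simpa using hl)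
        simp only [List.mem_cons, hk, false_or]
        rw [ih _ hlen k]
        simp [List.mem_filter, hk]

lemma pvGroups_mem (l : List Int) (k : Int) : k ∈ pvGroups l ↔ k ∈ l :=
  pvGroups_mem_aux l.length l le_rfl k

lemma pvGroups_nodup_aux (n : Nat) : ∀ (l : List Int), l.length ≤ n →
    (pvGroups l).Nodup := by
  induction n with
  | zero =>
    intro l hl
    rw [List.length_eq_zero_iff.mp (Nat.le_zero.mp hl)]
    simp [pvGroups_nil]
  | succ n ih =>
    intro l hl
    cases l with
    | nil => simp [pvGroups_nil]
    | cons x t =>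
      rw [pvGroups_cons]
      have hlen : (t.filter (fun y => y ≠ x)).length ≤ n :=
        le_trans (List.length_filter_le _ _) (by simpa using hl)
      refine List.nodup_cons.mpr ⟨?_, ih _ hlen⟩
      intro hx
      have := (pvGroups_mem _ x).mp hx
      simp [List.mem_filter] at this

lemma pvGroups_nodup (l : List Int) : (pvGroups l).Nodup :=
  pvGroups_nodup_aux l.length l le_rfl

-- the canonical fold only depends on cnt's values on the list's members
lemma pvF_foldl_congr (cnt cnt' : Int → Int) (l : List Int) (a : Int)
    (h : ∀ k ∈ l, cnt k = cnt' k) :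
    l.foldl (pvF cnt) a = l.foldl (pvF cnt') a := by
  induction l generalizing a with
  | nil => rfl
  | cons x t ih =>
    simp only [List.foldl_cons]
    rw [show pvF cnt a x = pvF cnt' a x by simp [pvF, h x (by simp)]]
    exact ih _ (fun k hk => h k (by simp [hk]))

-- the canonical fold is invariant under permutation
lemma pvF_foldl_perm (cnt : Int → Int) {l1 l2 : List Int} (h : l1.Perm l2) (a : Int) :
    l1.foldl (pvF cnt) a = l2.foldl (pvF cnt) a := by
  induction h generalizing a with
  | nil => rfl
  | cons x _ ih => simp only [List.foldl_cons]; exact ih _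
  | swap x y l =>
    simp only [List.foldl_cons]
    have : pvF cnt (pvF cnt a y) x = pvF cnt (pvF cnt a x) y := by
      unfold pvF; split_ifs <;> simp [max_assoc, max_comm x y]
    rw [this]
  | trans _ _ ih1 ih2 => rw [ih1, ih2]

-- an open run (value v, length m) absorbed by the rest of a sorted tail
lemma pvMain' (l : List Int) (hs : l.Pairwise (· ≤ ·)) (v : Int) (hv : ∀ y ∈ l, v ≤ y)
    (ans m : Int) :
    pythonicAltClose (l.foldl pythonicAltStep (ans, some v, m)) =
      (pvGroups (l.filter (fun y => y ≠ v))).foldl (pvF (fun k => (l.count k : Int)))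
        (if m + (l.count v : Int) = v then max ans v else ans) := by
  induction l generalizing v ans m with
  | nil => simp [pythonicAltClose, pvGroups_nil]
  | cons x t ih =>
    have hst : t.Pairwise (· ≤ ·) := hs.tail
    have hxt : ∀ y ∈ t, x ≤ y := fun y hy => (List.pairwise_cons.mp hs).1 y hy
    by_cases hxv : x = v
    · subst hxv
      have hstep : pythonicAltStep (ans, some x, m) x = (ans, some x, m + 1) := by
        simp [pythonicAltStep]
      simp only [List.foldl_cons, hstep]
      rw [ih hst x (fun y hy => hxt y hy) ans (m + 1)]
      have hft : (x :: t).filter (fun y => y ≠ x) = t.filter (fun y => y ≠ x) := by simp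
      rw [hft]
      have hinit : (if m + 1 + (t.count x : Int) = x then max ans x else ans)
          = (if m + ((x :: t).count x : Int) = x then max ans x else ans) := by
        have : ((x :: t).count x : Int) = (t.count x : Int) + 1 := by simp
        rw [this]
        split_ifs <;> first | rfl | omega
      rw [hinit]
      refine pvF_foldl_congr _ _ _ _ ?_
      intro k hk
      have hkx : k ≠ x := by
        have := (pvGroups_mem _ k).mp hk
        simp [List.mem_filter] at this; exact this.2
      simp only [List.count_cons]
      have : (x == k) = false := by simp; exact fun h => hkx h.symm
      simp [this]
    · have hvx : v < x := lt_of_le_of_ne (hv x (by simp)) (Ne.symm hxv)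
      have hnv : ∀ y ∈ t, y ≠ v := fun y hy => by
        have := hxt y hy; omega
      have hcv : t.count v = 0 := List.count_eq_zero.mpr (fun h => hnv v h rfl)
      have hstep : pythonicAltStep (ans, some v, m) x
          = ((if m = v then max ans v else ans), some x, 1) := by
        simp only [pythonicAltStep]
        have : (some x == some v) = false := by simp [hxv]
        simp [this, beq_iff_eq]
      simp only [List.foldl_cons, hstep]
      rw [ih hst x hxt _ 1]
      have hfv : (x :: t).filter (fun y => y ≠ v) = x :: t := by
        have h2 : t.filter (fun y => y ≠ v) = t :=
          List.filter_eq_self.mpr (fun a ha => by simpa using hnv a ha)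
        have h3 : (decide (x ≠ v)) = true := by simpa using hxv
        simp only [List.filter_cons, h2, h3, if_true]
      have hcv' : ((x :: t).count v : Int) = 0 := by
        simp [List.count_cons, hcv]; exact hxv
      rw [hfv, hcv', pvGroups_cons]
      simp only [List.foldl_cons, add_zero]
      have hhead : pvF (fun k => ((x :: t).count k : Int)) (if m = v then max ans v else ans) x
          = (if 1 + (t.count x : Int) = x then max (if m = v then max ans v else ans) x
             else (if m = v then max ans v else ans)) := by
        have : ((x :: t).count x : Int) = 1 + (t.count x : Int) := by
          simp; ring
        simp only [pvF, this]
      rw [hhead]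
      refine pvF_foldl_congr _ _ _ _ ?_
      intro k hk
      have hkx : k ≠ x := by
        have := (pvGroups_mem _ k).mp hk
        simp [List.mem_filter] at this; exact this.2
      simp only [List.count_cons]
      have : (x == k) = false := by simp; exact fun h => hkx h.symm
      simp [this]

-- run-scan on a sorted list computes the canonical fold over its distinct values
lemma pvMain (l : List Int) (hs : l.Pairwise (· ≤ ·)) (ans : Int) :
    pythonicAltClose (l.foldl pythonicAltStep (ans, none, 0)) =
      (pvGroups l).foldl (pvF (fun k => (l.count k : Int))) ans := by
  cases l with
  | nil => simp [pythonicAltClose, pvGroups_nil]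
  | cons x t =>
    have hst : t.Pairwise (· ≤ ·) := hs.tail
    have hxt : ∀ y ∈ t, x ≤ y := fun y hy => (List.pairwise_cons.mp hs).1 y hy
    have hstep : pythonicAltStep (ans, none, 0) x = (ans, some x, 1) := by
      simp [pythonicAltStep]
    simp only [List.foldl_cons, hstep]
    rw [pvMain' t hst x hxt ans 1, pvGroups_cons]
    simp only [List.foldl_cons]
    have hhead : pvF (fun k => ((x :: t).count k : Int)) ans x
        = (if 1 + (t.count x : Int) = x then max ans x else ans) := by
      have : ((x :: t).count x : Int) = 1 + (t.count x : Int) := by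
        simp; ring
      simp only [pvF, this]
    rw [hhead]
    refine pvF_foldl_congr _ _ _ _ ?_
    intro k hk
    have hkx : k ≠ x := by
      have := (pvGroups_mem _ k).mp hk
      simp [List.mem_filter] at this; exact this.2
    simp only [List.count_cons]
    have : (x == k) = false := by simp; exact fun h => hkx h.symm
    simp [this]

-- A's per-item test 'k == v' is pvF with cnt = count
lemma pvA_fold (cnt : Int → Int) (l : List Int) (a : Int) :
    l.foldl (fun ans k => if k == cnt k then max ans k else ans) a
      = l.foldl (pvF cnt) a := by
  induction l generalizing a with
  | nil => rfl
  | cons x t ih =>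
    simp only [List.foldl_cons]
    rw [show (if x == cnt x then max a x else a) = pvF cnt a x by
      unfold pvF
      by_cases h : cnt x = x
      · simp [h]
      · have hb : (x == cnt x) = false := by simp; exact fun hh => h hh.symm
        simp [hb, h]]
    exact ih _

-- A's Counter scan is the canonical fold over the first-occurrence distinct values
lemma pvA_eq (arr : List Int) :
    pythonic arr = (PySem.List.dedup arr).foldl (pvF (fun k => (arr.count k : Int))) (-1) := by
  unfold pythonic
  rw [PySem.Dict.items_counter, List.foldl_map]
  exact pvA_fold (fun k => (arr.count k : Int)) _ _

-- ===== VERDICT (by name: the statement is the Claim_ definition above) =====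
theorem pythonic_spec : Claim_equal_pythonic := by
  intro arr _
  unfold Spec_pythonic pythonic_alt
  set s := PySem.List.sorted arr (fun x => x) false with hsdef
  have hperm : s.Perm arr := PySem.List.sorted_perm arr _ _
  have hsort : s.Pairwise (· ≤ ·) := by
    simpa using PySem.List.sorted_pairwise arr (fun x => x)
  rw [pvA_eq, pvMain s hsort (-1)]
  have hcnt : ∀ k ∈ pvGroups s, ((s.count k : Int)) = ((arr.count k : Int)) :=
    fun k _ => congrArg (fun n : Nat => (n : Int)) (hperm.count_eq k)
  rw [pvF_foldl_congr (fun k => (s.count k : Int)) (fun k => (arr.count k : Int))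
    (pvGroups s) (-1) hcnt]
  refine pvF_foldl_perm _ ?_ _
  refine (List.perm_ext_iff_of_nodup (PySem.List.nodup_dedup arr) (pvGroups_nodup s)).mpr ?_
  intro k
  rw [PySem.List.mem_dedup, pvGroups_mem]
  exact (hperm.mem_iff).symm
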